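-- pv_equiv track=rewrite | github.com/NingShuZhu/aro_lab | path_v2.py | add_vertices_to_graph
-- ===== SOURCE A (Python) =====
-- def add_vertices_to_graph(vertices, parent_idx, G):
--     # for i, vertex in enumerate(vertices):
--
--     if not vertices:
--         return parent_idx  # 没有新节点就直接返回原父节点
--
--     current_parent = parent_idx
--     for pos, q in vertices:
--         # 添加节点 (parent, pos, q)
--         G.append((current_parent, pos, q))
--         # 更新父节点索引，让下一节点连到刚加的点上
--         current_parent = len(G) - 1
--
--     return current_parent  # 返回最后一个节点索引
-- ===== SOURCE B (Python) =====
-- def add_vertices_to_graph(vertices, parent_idx, G):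
--     # Divide and conquer: attach the first half of the chain under parent_idx,
--     # then attach the second half under the last index of the first half.
--     if not vertices:
--         return parent_idx
--     if len(vertices) == 1:
--         pos, q = vertices[0]
--         G.append((parent_idx, pos, q))
--         return len(G) - 1
--     mid = len(vertices) // 2
--     p = add_vertices_to_graph(vertices[:mid], parent_idx, G)
--     return add_vertices_to_graph(vertices[mid:], p, G)
-- ===== Notes on version B (the rewrite author's own statement) =====
-- stated objective: alternative
-- what changed: Replaces A's single left-to-right loop with a loop-carried current_parent by a divide-and-conquer recursion: the chain for the first half is attached under parent_idx, then the second half is attached under the index returned for the first half; the single-node base case appends directly.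
import Mathlib
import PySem

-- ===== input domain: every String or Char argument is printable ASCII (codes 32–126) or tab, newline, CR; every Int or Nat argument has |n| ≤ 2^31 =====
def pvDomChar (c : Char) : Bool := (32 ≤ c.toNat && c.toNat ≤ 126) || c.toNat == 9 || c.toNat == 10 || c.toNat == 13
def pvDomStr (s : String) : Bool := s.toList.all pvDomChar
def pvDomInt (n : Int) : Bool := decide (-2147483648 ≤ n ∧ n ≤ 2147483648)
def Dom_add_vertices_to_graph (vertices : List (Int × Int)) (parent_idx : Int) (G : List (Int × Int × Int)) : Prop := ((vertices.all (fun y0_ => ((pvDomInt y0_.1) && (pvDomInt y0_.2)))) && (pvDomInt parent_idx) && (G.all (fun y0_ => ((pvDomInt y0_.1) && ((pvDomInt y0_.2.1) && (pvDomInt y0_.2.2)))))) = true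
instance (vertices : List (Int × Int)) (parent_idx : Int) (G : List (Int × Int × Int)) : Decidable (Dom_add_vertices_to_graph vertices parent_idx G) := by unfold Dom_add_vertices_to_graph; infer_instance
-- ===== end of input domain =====

-- ===== PORT A =====
-- B changes the traversal (divide-and-conquer instead of a left-to-right loop); both mutate G
-- by appending the same nodes in the same order, and the equivalence proved is about the RETURN value.
-- A: loop appending (current_parent, pos, q), current_parent := len(G)-1.
def add_vertices_to_graph (vertices : List (Int × Int)) (parent_idx : Int) (G : List (Int × Int × Int)) : Int :=
  if vertices = [] then parent_idx
  else
    (vertices.foldl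
      (fun (s : Int × List (Int × Int × Int)) (pq : Int × Int) =>
        let G' := s.2 ++ [(s.1, pq.1, pq.2)]
        ((G'.length : Int) - 1, G'))
      (parent_idx, G)).1

-- ===== PORT B =====
-- B: divide and conquer; Python's mutable G is threaded explicitly as the second state component.
-- vertices[:mid] / vertices[mid:] with 0 ≤ mid ≤ len are exactly take/drop.
def add_vertices_to_graph_altGo (vertices : List (Int × Int)) (parent_idx : Int) (G : List (Int × Int × Int)) : Int × List (Int × Int × Int) :=
  if h0 : vertices = [] then (parent_idx, G)
  else if h1 : vertices.length = 1 then
    let pq := vertices.head h0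
    let G' := G ++ [(parent_idx, pq.1, pq.2)]
    ((G'.length : Int) - 1, G')
  else
    let mid := vertices.length / 2
    let r1 := add_vertices_to_graph_altGo (vertices.take mid) parent_idx G
    add_vertices_to_graph_altGo (vertices.drop mid) r1.1 r1.2
  termination_by vertices.length
  decreasing_by
  · have := List.length_pos_of_ne_nil h0
    simp [List.length_take]; omega
  · have := List.length_pos_of_ne_nil h0
    simp [List.length_drop]; omega

def add_vertices_to_graph_alt (vertices : List (Int × Int)) (parent_idx : Int) (G : List (Int × Int × Int)) : Int :=
  (add_vertices_to_graph_altGo vertices parent_idx G).1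

-- ===== PRECONDITION & SPEC =====
def Spec_add_vertices_to_graph (vertices : List (Int × Int)) (parent_idx : Int) (G : List (Int × Int × Int)) (out : Int) : Prop := out = add_vertices_to_graph_alt vertices parent_idx G
instance (vertices : List (Int × Int)) (parent_idx : Int) (G : List (Int × Int × Int)) (out : Int) : Decidable (Spec_add_vertices_to_graph vertices parent_idx G out) := by unfold Spec_add_vertices_to_graph; infer_instance

-- ===== CLAIM (what is proved, stated in full; the proofs are below) =====
def Claim_equal_add_vertices_to_graph : Prop := ∀ (vertices : List (Int × Int)) (parent_idx : Int) (G : List (Int × Int × Int)), Dom_add_vertices_to_graph vertices parent_idx G → Spec_add_vertices_to_graph vertices parent_idx G (add_vertices_to_graph vertices parent_idx G)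

-- ===== LEMMAS AND PROOFS =====

def pvStep : Int × List (Int × Int × Int) → Int × Int → Int × List (Int × Int × Int) :=
  fun s pq =>
    let G' := s.2 ++ [(s.1, pq.1, pq.2)]
    ((G'.length : Int) - 1, G')

theorem pvStep_len : ∀ (v : List (Int × Int)) (s : Int × List (Int × Int × Int)),
    ((v.foldl pvStep s).2).length = s.2.length + v.length := by
  intro v
  induction v with
  | nil => intro s; simp
  | cons a t ih => intro s; simp [List.foldl, pvStep, ih]; omega

theorem pvFold_fst : ∀ (v : List (Int × Int)), v ≠ [] → ∀ (s : Int × List (Int × Int × Int)),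
    (v.foldl pvStep s).1 = ((v.foldl pvStep s).2.length : Int) - 1 := by
  intro v
  induction v with
  | nil => intro h; exact absurd rfl h
  | cons a t ih =>
    intro _ s
    cases t with
    | nil => simp [List.foldl, pvStep]
    | cons b u => exact ih (by simp) _

-- closed form for B's recursion: result index and length of the threaded G
theorem pvGo_spec : ∀ (n : ℕ) (v : List (Int × Int)) (p : Int) (G : List (Int × Int × Int)),
    v.length = n →
    (add_vertices_to_graph_altGo v p G).1
      = (if v = [] then p else (G.length : Int) + v.length - 1)
    ∧ ((add_vertices_to_graph_altGo v p G).2).length = G.length + v.length := by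
  intro n
  induction n using Nat.strong_induction_on with
  | _ n ih =>
    intro v p G hn
    by_cases h0 : v = []
    · subst h0; simp [add_vertices_to_graph_altGo]
    · by_cases h1 : v.length = 1
      · rw [add_vertices_to_graph_altGo]
        simp [h0, h1]
      · have hlen : v.length ≥ 2 := by
          rcases v with _ | ⟨a, _ | ⟨b, t⟩⟩ <;> simp_all <;> omega
        rw [add_vertices_to_graph_altGo]
        rw [dif_neg h0, dif_neg h1]
        set mid := v.length / 2 with hmid
        have hm1 : 1 ≤ mid := by omega
        have hm2 : mid < v.length := by omega
        have ht : (v.take mid).length = mid := by simp [List.length_take]; omega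
        have hd : (v.drop mid).length = v.length - mid := by simp [List.length_drop]
        have r1 := ih mid (by omega) (v.take mid) p G ht
        have htne : v.take mid ≠ [] := by
          intro h; rw [h] at ht; simp at ht; omega
        have hdne : v.drop mid ≠ [] := by
          intro h; rw [h] at hd; simp at hd; omega
        have r2 := ih (v.length - mid) (by omega) (v.drop mid)
          (add_vertices_to_graph_altGo (v.take mid) p G).1
          (add_vertices_to_graph_altGo (v.take mid) p G).2 hd
        have e1 : ((add_vertices_to_graph_altGo (v.take mid) p G).2).length = G.length + mid := by
          rw [r1.2, ht]
        constructor
        · rw [r2.1]; simp only [hdne, h0, ite_false]; rw [e1, hd]; push_cast; omega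
        · rw [r2.2, e1, hd]; omega

-- ===== VERDICT (by name: the statement is the Claim_ definition above) =====
theorem add_vertices_to_graph_spec : Claim_equal_add_vertices_to_graph := by
  intro vertices parent_idx G _
  unfold Spec_add_vertices_to_graph add_vertices_to_graph add_vertices_to_graph_alt
  by_cases hv : vertices = []
  · subst hv; simp [add_vertices_to_graph_altGo]
  · have h1 := pvFold_fst vertices hv (parent_idx, G)
    have h2 := pvStep_len vertices (parent_idx, G)
    have h3 := (pvGo_spec vertices.length vertices parent_idx G rfl).1
    simp only [hv, ite_false]
    show (vertices.foldl pvStep (parent_idx, G)).1 = _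
    rw [h1, h2, h3]
    simp [hv]
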